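-- pv_equiv track=rewrite | github.com/jakesco/advent-of-code | 2021/day10.py | part_2
-- ===== SOURCE A (Python) =====
-- from collections import deque
--
-- CHUNK_MAP = {
--     "(": ")",
--     "<": ">",
--     "[": "]",
--     "{": "}",
-- }
--
-- POINTS = {")": 3, "]": 57, "}": 1197, ">": 25137}
--
-- POINTS2 = {")": 1, "]": 2, "}": 3, ">": 4}
--
-- def validate_chunk(line: str, start: int) -> int:
--     if line[start] not in CHUNK_MAP.keys():
--         return 0
--
--     stack = deque()
--     stack.append(CHUNK_MAP[line[start]])
--     for i in range(start + 1, len(line)):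
--         char = line[i]
--         if char in CHUNK_MAP.keys():
--             stack.append(CHUNK_MAP[char])
--         elif char in CHUNK_MAP.values() and len(stack) > 0:
--             match = stack.pop()
--             if char != match:
--                 return POINTS[char]
--     return 0
--
-- def find_chunks(line: str) -> int:
--     for i in range(len(line)):
--         if (points := validate_chunk(line, i)) != 0:
--             return points
--     return 0
--
-- def complete_line(line: str) -> str:
--     stack = deque()
--     for i in range(len(line)):
--         char = line[i]
--         if char in CHUNK_MAP.keys():
--             stack.append(CHUNK_MAP[char])
--         elif char in CHUNK_MAP.values() and len(stack) > 0:
--             stack.pop()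
--     stack.reverse()
--     return "".join([s for s in stack])
--
-- def calculate_points(completion: str) -> int:
--     points = 0
--     for char in completion:
--         points *= 5
--         points += POINTS2[char]
--     return points
--
-- def part_2(lines: list[str]) -> int:
--     incomplete = [line for line in lines if find_chunks(line) == 0]
--
--     points = []
--     for line in incomplete:
--         completion = complete_line(line)
--         points.append(calculate_points(completion))
--
--     points.sort()
--     return points[len(points) // 2]
-- ===== SOURCE B (Python) =====
-- PAIR = {"(": ")", "<": ">", "[": "]", "{": "}"}
-- VALS = {")": 1, "]": 2, "}": 3, ">": 4}
--
-- def part_2(lines):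
--     # One stack pass per line: detect corruption and build the completion at once.
--     scores = []
--     for line in lines:
--         stack = []
--         ok = True
--         for ch in line:
--             closer = PAIR.get(ch)
--             if closer is not None:
--                 stack.append(closer)
--             elif ch in VALS and stack:
--                 if stack.pop() != ch:
--                     ok = False
--                     break
--         if ok:
--             score = 0
--             for c in reversed(stack):
--                 score = score * 5 + VALS[c]
--             scores.append(score)
--     scores.sort()
--     return scores[len(scores) // 2]
-- ===== Notes on version B (the rewrite author's own statement) =====
-- stated objective: faster
-- what changed: A tests every start index of every line with a fresh stack simulation (quadratic per line) and then builds the completion string in a second pass; B makes a single stack pass per line that detects corruption and yields the completion stack at once, scoring it directly without building a string.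
import Mathlib
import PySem

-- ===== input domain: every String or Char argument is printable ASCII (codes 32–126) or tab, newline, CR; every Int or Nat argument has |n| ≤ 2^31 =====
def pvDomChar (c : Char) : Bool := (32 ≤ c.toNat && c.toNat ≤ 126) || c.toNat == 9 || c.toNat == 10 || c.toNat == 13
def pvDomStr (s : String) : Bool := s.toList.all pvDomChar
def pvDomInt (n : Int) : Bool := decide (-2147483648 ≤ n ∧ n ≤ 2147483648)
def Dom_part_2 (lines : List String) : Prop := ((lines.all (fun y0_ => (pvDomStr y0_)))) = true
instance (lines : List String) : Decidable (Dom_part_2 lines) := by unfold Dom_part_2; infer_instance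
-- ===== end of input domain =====

-- B replaces A's per-start-index re-simulation (quadratic per line) by one stack pass per line
-- that detects corruption and yields the completion at once; timing run reports the speed-up.
-- A raises IndexError when no line is incomplete (points[] empty); Pre_ excludes exactly that.


-- ===== PORT A =====
-- CHUNK_MAP lookup (Python dict order "(", "<", "[", "{"); none = not in CHUNK_MAP.keys()
def chunkVal? (c : Char) : Option Char :=
  if c = '(' then some ')' else if c = '<' then some '>'
  else if c = '[' then some ']' else if c = '{' then some '}' else none

-- char in CHUNK_MAP.values()
def isCloser (c : Char) : Bool := c = ')' || c = ']' || c = '}' || c = '>'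

-- POINTS[char]; default 0 is unreachable (only looked up at closers)
def points1 (c : Char) : Int :=
  if c = ')' then 3 else if c = ']' then 57 else if c = '}' then 1197
  else if c = '>' then 25137 else 0

-- POINTS2[char]; default 0 is unreachable (completions consist of closers)
def points2 (c : Char) : Int :=
  if c = ')' then 1 else if c = ']' then 2 else if c = '}' then 3
  else if c = '>' then 4 else 0

-- validate_chunk's for-loop over range(start+1, len(line)); the deque is a list with its top
-- at the head (append = push, pop = head)
def validateLoop : List Char → List Char → Int
  | [], _ => 0
  | c :: rest, stack =>
    match chunkVal? c with
    | some m => validateLoop rest (m :: stack)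
    | none =>
      if isCloser c then
        match stack with
        | m :: s' => if c = m then validateLoop rest s' else points1 c
        | [] => validateLoop rest []          -- len(stack) > 0 fails: char ignored
      else validateLoop rest stack

-- validate_chunk(line, start), the scanned suffix line[start:] given as a list
def validateChunk : List Char → Int
  | [] => 0
  | c :: rest =>
    match chunkVal? c with
    | none => 0                               -- line[start] not in CHUNK_MAP.keys()
    | some m => validateLoop rest [m]

-- find_chunks: the range(len(line)) loop over start indices = recursion over suffixes
def findChunks : List Char → Int
  | [] => 0
  | c :: rest =>
    let p := validateChunk (c :: rest)
    if p ≠ 0 then p else findChunks rest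

-- complete_line's loop; the returned stack (top at head) IS the reversed-deque completion
def completeLoop : List Char → List Char → List Char
  | [], stack => stack
  | c :: rest, stack =>
    match chunkVal? c with
    | some m => completeLoop rest (m :: stack)
    | none =>
      if isCloser c then
        match stack with
        | _ :: s' => completeLoop rest s'
        | [] => completeLoop rest []
      else completeLoop rest stack

-- calculate_points
def calcPoints : List Char → Int → Int
  | [], points => points
  | c :: rest, points => calcPoints rest (points * 5 + points2 c)

def part_2 (lines : List String) : Int :=
  let incomplete := lines.filter (fun line => findChunks line.toList == 0)
  let points := incomplete.map (fun line => calcPoints (completeLoop line.toList []) 0)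
  let sorted := PySem.List.sorted points (fun x => x) false
  -- points[len(points) // 2]; the none (IndexError, empty points) case is excluded by Pre_
  (PySem.List.pyGet? sorted (PySem.Int.floordiv sorted.length 2)).getD 0

-- ===== PORT B =====
-- PAIR.get(ch)
def pairOf (c : Char) : Option Char :=
  if c = '(' then some ')' else if c = '[' then some ']'
  else if c = '{' then some '}' else if c = '<' then some '>' else none

-- VALS.get(ch): some = ch in VALS, with its value
def val2? (c : Char) : Option Int :=
  if c = ')' then some 1 else if c = ']' then some 2 else if c = '}' then some 3
  else if c = '>' then some 4 else none

-- B's single pass: none = corrupted (break), some stack = completion stack (top at head,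
-- i.e. already in python's reversed(stack) order)
def scanLine : List Char → List Char → Option (List Char)
  | [], stack => some stack
  | c :: rest, stack =>
    match pairOf c with
    | some m => scanLine rest (m :: stack)
    | none =>
      match val2? c, stack with
      | some _, m :: s' => if m = c then scanLine rest s' else none
      | _, _ => scanLine rest stack

-- B's scoring fold over reversed(stack)
def scoreStack (stack : List Char) : Int :=
  stack.foldl (fun acc c => acc * 5 + (val2? c).getD 0) 0

def part_2_alt (lines : List String) : Int :=
  let scores := lines.filterMap (fun line => (scanLine line.toList []).map scoreStack)
  let s := PySem.List.sorted scores (fun x => x) false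
  -- scores[len(scores) // 2]; the empty case is excluded by Pre_
  (PySem.List.pyGet? s (PySem.Int.floordiv s.length 2)).getD 0

-- ===== PRECONDITION & SPEC =====
-- Pre_'s own one-pass checker (independent of both ports): does the line survive the
-- bracket scan without a mismatched close?
def preScan : List Char → List Char → Bool
  | [], _ => true
  | c :: rest, st =>
    if c = '(' then preScan rest (')' :: st)
    else if c = '[' then preScan rest (']' :: st)
    else if c = '{' then preScan rest ('}' :: st)
    else if c = '<' then preScan rest ('>' :: st)
    else if c = ')' ∨ c = ']' ∨ c = '}' ∨ c = '>' then
      match st with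
      | m :: st' => m = c && preScan rest st'
      | [] => preScan rest st
    else preScan rest st

-- Pre_ excludes exactly the inputs with no non-corrupted line, where A's points[len//2] raises IndexError.
def Pre_part_2 (lines : List String) : Prop :=
  (lines.any (fun line => preScan line.toList [])) = true
instance (lines : List String) : Decidable (Pre_part_2 lines) := by unfold Pre_part_2; infer_instance

def pvWitness_part_2 : List String := ["<{([", "(]"]

def Spec_part_2 (lines : List String) (out : Int) : Prop := out = part_2_alt lines
instance (lines : List String) (out : Int) : Decidable (Spec_part_2 lines out) := by unfold Spec_part_2; infer_instance

-- ===== CLAIM (what is proved, stated in full; the proofs are below) =====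
def Claim_equal_part_2 : Prop := ∀ (lines : List String), Dom_part_2 lines → Pre_part_2 lines → Spec_part_2 lines (part_2 lines)

-- ===== LEMMAS AND PROOFS =====
theorem chunkVal?_eq (c : Char) : chunkVal? c = pairOf c := by
  unfold chunkVal? pairOf; split_ifs <;> simp_all

theorem isCloser_eq (c : Char) : isCloser c = (val2? c).isSome := by
  unfold isCloser val2?; split_ifs <;> simp_all

theorem points1_ne_zero (c : Char) (h : isCloser c = true) : points1 c ≠ 0 := by
  unfold isCloser at h; unfold points1
  split_ifs <;> simp_all

theorem points2_eq (c : Char) : points2 c = (val2? c).getD 0 := by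
  unfold points2 val2?; split_ifs <;> rfl

-- validateLoop and scanLine are the same scan with different result encodings
theorem validateLoop_iff (cs : List Char) : ∀ st,
    (validateLoop cs st = 0 ↔ (scanLine cs st).isSome = true) := by
  induction cs with
  | nil => intro st; simp [validateLoop, scanLine]
  | cons c rest ih =>
    intro st
    simp only [validateLoop, scanLine, ← chunkVal?_eq]
    cases hv : chunkVal? c with
    | some m => simpa using ih (m :: st)
    | none =>
      simp only []
      by_cases hc : isCloser c = true
      · have hs : (val2? c).isSome = true := by rw [← isCloser_eq]; exact hc
        obtain ⟨v, hv2⟩ := Option.isSome_iff_exists.1 hs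
        cases st with
        | nil => simpa [hc, hv2] using ih []
        | cons m s' =>
          simp only [hc, if_true, hv2]
          by_cases hm : c = m
          · subst hm; simpa using ih s'
          · have hm' : ¬ m = c := fun h => hm h.symm
            simp [hm, hm', points1_ne_zero c hc]
      · have hn : val2? c = none := by
          cases h2 : val2? c with
          | none => rfl
          | some v => exact absurd (by rw [isCloser_eq, h2]; rfl) hc
        simp [hc, hn]; exact ih st

-- removing extra entries below the stack preserves scan success
theorem scanLine_drop (cs : List Char) : ∀ s t,
    (scanLine cs (s ++ t)).isSome = true → (scanLine cs s).isSome = true := by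
  induction cs with
  | nil => intro s t _; simp [scanLine]
  | cons c rest ih =>
    intro s t h
    simp only [scanLine] at h ⊢
    cases hv : pairOf c with
    | some m =>
      rw [hv] at h
      exact ih (m :: s) t (by simpa using h)
    | none =>
      rw [hv] at h
      cases h2 : val2? c with
      | none => rw [h2] at h; exact ih s t h
      | some v =>
        rw [h2] at h
        cases s with
        | cons m s' =>
          simp only [List.cons_append] at h
          by_cases hm : m = c
          · simp only [hm, if_true] at h ⊢; exact ih s' t h
          · simp [hm] at h
        | nil =>
          simp only [List.nil_append] at h
          cases t with
          | nil => exact ih [] [] (by simpa using h)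
          | cons m t' =>
            by_cases hm : m = c
            · simp only [hm, if_true] at h
              exact ih [] t' (by simpa using h)
            · simp [hm] at h

theorem scanLine_tail (c : Char) (rest : List Char)
    (h : (scanLine (c :: rest) []).isSome = true) : (scanLine rest []).isSome = true := by
  simp only [scanLine] at h
  cases hv : pairOf c with
  | some m =>
    rw [hv] at h
    exact scanLine_drop rest [] [m] (by simpa using h)
  | none =>
    rw [hv] at h
    cases h2 : val2? c with
    | none => rwa [h2] at h
    | some v => rwa [h2] at h

theorem findChunks_iff (cs : List Char) :
    findChunks cs = 0 ↔ (scanLine cs []).isSome = true := by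
  induction cs with
  | nil => simp [findChunks, scanLine]
  | cons c rest ih =>
    simp only [findChunks]
    constructor
    · intro h
      by_cases hp : validateChunk (c :: rest) = 0
      · rw [if_neg (by simp [hp])] at h
        have hrest := ih.1 h
        simp only [scanLine]
        cases hv : pairOf c with
        | some m =>
          simp only [validateChunk, chunkVal?_eq, hv] at hp
          exact (validateLoop_iff rest [m]).1 hp
        | none =>
          cases h2 : val2? c with
          | none => exact hrest
          | some v => exact hrest
      · rw [if_pos hp] at h; exact absurd h hp
    · intro h
      have hrest : findChunks rest = 0 := ih.2 (scanLine_tail c rest h)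
      have hvc : validateChunk (c :: rest) = 0 := by
        simp only [validateChunk, chunkVal?_eq]
        cases hv : pairOf c with
        | none => simp
        | some m =>
          apply (validateLoop_iff rest [m]).2
          simp only [scanLine, hv] at h; exact h
      simp [hvc, hrest]

theorem completeLoop_eq (cs : List Char) : ∀ st st',
    scanLine cs st = some st' → completeLoop cs st = st' := by
  induction cs with
  | nil => intro st st' h; simp [scanLine] at h; simp [completeLoop, h]
  | cons c rest ih =>
    intro st st' h
    simp only [scanLine] at h
    simp only [completeLoop, chunkVal?_eq]
    cases hv : pairOf c with
    | some m => rw [hv] at h; exact ih _ _ h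
    | none =>
      rw [hv] at h
      cases h2 : val2? c with
      | none =>
        rw [h2] at h
        have hc : isCloser c = false := by rw [isCloser_eq, h2]; rfl
        simp only [hc, Bool.false_eq_true, if_false]
        exact ih _ _ h
      | some v =>
        rw [h2] at h
        have hc : isCloser c = true := by rw [isCloser_eq, h2]; rfl
        simp only [hc, if_true]
        cases st with
        | nil => exact ih _ _ h
        | cons m s' =>
          by_cases hm : m = c
          · simp only [hm, if_true] at h; exact ih _ _ h
          · simp [hm] at h

theorem calcPoints_eq (cs : List Char) : ∀ acc,
    calcPoints cs acc = cs.foldl (fun a c => a * 5 + (val2? c).getD 0) acc := by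
  induction cs with
  | nil => intro acc; rfl
  | cons c rest ih => intro acc; simp [calcPoints, List.foldl, points2_eq, ih]

theorem lists_eq (lines : List String) :
    (lines.filter (fun line => findChunks line.toList == 0)).map
        (fun line => calcPoints (completeLoop line.toList []) 0)
      = lines.filterMap (fun line => (scanLine line.toList []).map scoreStack) := by
  induction lines with
  | nil => rfl
  | cons l rest ih =>
    cases h : scanLine l.toList [] with
    | none =>
      have hne : findChunks l.toList ≠ 0 := by
        intro hc
        have hs := (findChunks_iff _).1 hc
        rw [h] at hs; exact absurd hs (by simp)
      have hf : (findChunks l.toList == 0) = false := beq_eq_false_iff_ne.2 hne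
      simp only [List.filter_cons, hf, Bool.false_eq_true, if_false,
        List.filterMap_cons, h, Option.map_none]
      exact ih
    | some st =>
      have hf : (findChunks l.toList == 0) = true := by
        simp only [beq_iff_eq]
        rw [findChunks_iff, h]; rfl
      have hcl : completeLoop l.toList [] = st := completeLoop_eq _ _ _ h
      simp only [List.filter_cons, hf, if_true, List.map_cons, List.filterMap_cons, h]
      simp only [Option.map_some]
      rw [ih, hcl, calcPoints_eq]
      rfl

-- ===== VERDICT (by name: the statement is the Claim_ definition above) =====
theorem part_2_spec : Claim_equal_part_2 := by
  intro lines _ _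
  unfold Spec_part_2 part_2 part_2_alt
  simp only [lists_eq]
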